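-- pv_equiv track=rewrite | github.com/kdh0428/VLM-Dynamic-temp | scripts/plot_attn_gate_scatter.py | _group_steps_by_sample
-- ===== SOURCE A (Python) =====
-- from typing import Any, Dict, List, Tuple
--
-- def _group_steps_by_sample(step_rows: List[Dict[str, Any]]) -> List[List[Dict[str, Any]]]:
--     """Group step logs into samples using step==0 as a boundary."""
--     samples: List[List[Dict[str, Any]]] = []
--     current: List[Dict[str, Any]] = []
--     for row in step_rows:
--         step = row.get("step", None)
--         if step == 0 and current:
--             samples.append(current)
--             current = []
--         current.append(row)
--     if current:
--         samples.append(current)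
--     return samples
-- ===== SOURCE B (Python) =====
-- from typing import Any, Dict, List
--
-- def _group_steps_by_sample(step_rows: List[Dict[str, Any]]) -> List[List[Dict[str, Any]]]:
--     """Group step logs into samples using step==0 as a boundary.
--
--     Head-plus-span decomposition: each group is the current head row followed
--     by the span of rows up to (excluding) the next step==0 row.
--     """
--     samples: List[List[Dict[str, Any]]] = []
--     rows = step_rows
--     while rows:
--         k = 1
--         while k < len(rows) and rows[k].get("step", None) != 0:
--             k += 1
--         samples.append(rows[:k])
--         rows = rows[k:]
--     return samples
-- ===== Notes on version B (the rewrite author's own statement) =====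
-- stated objective: simpler
-- what changed: Replaces the accumulate-and-flush loop (open 'current' group flushed at each step==0 row and at the end) with a head-plus-span decomposition: repeatedly emit the head row together with the span of following rows up to the next step==0 row.
import Mathlib
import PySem

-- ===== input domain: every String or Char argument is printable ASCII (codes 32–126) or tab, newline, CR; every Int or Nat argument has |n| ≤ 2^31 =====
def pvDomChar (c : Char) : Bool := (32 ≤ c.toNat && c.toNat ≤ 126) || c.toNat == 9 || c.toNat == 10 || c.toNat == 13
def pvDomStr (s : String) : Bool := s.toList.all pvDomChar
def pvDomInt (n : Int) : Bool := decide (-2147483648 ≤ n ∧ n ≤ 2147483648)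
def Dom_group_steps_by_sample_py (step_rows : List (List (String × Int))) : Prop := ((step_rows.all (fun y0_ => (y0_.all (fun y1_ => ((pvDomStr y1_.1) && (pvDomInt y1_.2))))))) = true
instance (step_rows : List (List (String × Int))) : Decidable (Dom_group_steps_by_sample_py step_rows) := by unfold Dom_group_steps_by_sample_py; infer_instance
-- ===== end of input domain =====

-- B replaces A's accumulate-and-flush loop by a head-plus-span decomposition (objective: simpler/alternative).

-- ===== PORT A =====
-- row.get("step", None): first-match lookup in the association list (exact for a Python dict)
def pvGetStep (row : List (String × Int)) : Option Int :=
  (row.find? (fun kv => kv.1 == "step")).map (·.2)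

-- literal transliteration of A: foldl over rows with state (samples, current), final flush
def group_steps_by_sample_py (step_rows : List (List (String × Int))) : List (List (List (String × Int))) :=
  let st := step_rows.foldl
    (fun (st : List (List (List (String × Int))) × List (List (String × Int))) row =>
      let step := pvGetStep row
      let st :=
        if step = some 0 ∧ st.2 ≠ [] then (st.1 ++ [st.2], ([] : List (List (String × Int))))
        else st
      (st.1, st.2 ++ [row]))
    ([], [])
  if st.2 ≠ [] then st.1 ++ [st.2] else st.1

-- ===== PORT B =====
-- transliteration of B: emit head row plus the span of rows up to the next step==0 row, recurse
def group_steps_by_sample_py_alt (step_rows : List (List (String × Int))) : List (List (List (String × Int))) :=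
  match step_rows with
  | [] => []
  | x :: rest =>
      let grp := rest.takeWhile (fun r => ¬ (pvGetStep r = some 0))
      let rest' := rest.dropWhile (fun r => ¬ (pvGetStep r = some 0))
      (x :: grp) :: group_steps_by_sample_py_alt rest'
termination_by step_rows.length
decreasing_by
  simp only [List.length_cons]
  have := List.length_dropWhile_le (p := fun r => decide (¬ (pvGetStep r = some 0))) (l := rest)
  omega

-- ===== PRECONDITION & SPEC =====
def Spec_group_steps_by_sample_py (step_rows : List (List (String × Int))) (out : List (List (List (String × Int)))) : Prop := out = group_steps_by_sample_py_alt step_rows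
instance (step_rows : List (List (String × Int))) (out : List (List (List (String × Int)))) : Decidable (Spec_group_steps_by_sample_py step_rows out) := by unfold Spec_group_steps_by_sample_py; infer_instance

-- ===== CLAIM (what is proved, stated in full; the proofs are below) =====
def Claim_equal_group_steps_by_sample_py : Prop := ∀ (step_rows : List (List (String × Int))), Dom_group_steps_by_sample_py step_rows → Spec_group_steps_by_sample_py step_rows (group_steps_by_sample_py step_rows)

-- ===== LEMMAS AND PROOFS =====

-- A's grouping with an open group `cur`, written as structural recursion
def pvGoAux (cur : List (List (String × Int))) : List (List (String × Int)) → List (List (List (String × Int)))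
  | [] => [cur]
  | r :: rs =>
      if pvGetStep r = some 0 then cur :: pvGoAux [r] rs
      else pvGoAux (cur ++ [r]) rs

-- the fold of A with a non-empty open group computes pvGoAux
theorem pvFold_eq_goAux (rows : List (List (String × Int)))
    (samples : List (List (List (String × Int)))) (cur : List (List (String × Int)))
    (h : cur ≠ []) :
    (let st := rows.foldl
        (fun (st : List (List (List (String × Int))) × List (List (String × Int))) row =>
          let step := pvGetStep row
          let st :=
            if step = some 0 ∧ st.2 ≠ [] then (st.1 ++ [st.2], ([] : List (List (String × Int))))
            else st
          (st.1, st.2 ++ [row]))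
        (samples, cur)
      if st.2 ≠ [] then st.1 ++ [st.2] else st.1) = samples ++ pvGoAux cur rows := by
  induction rows generalizing samples cur with
  | nil => simp [pvGoAux, h]
  | cons r rs ih =>
      simp only [List.foldl_cons]
      by_cases hp : pvGetStep r = some 0
      · simp only [hp, h, ne_eq, not_false_eq_true, and_self, if_true, List.nil_append]
        rw [ih (samples ++ [cur]) [r] (by simp)]
        simp [pvGoAux, hp]
      · simp only [hp, false_and, if_false]
        rw [ih samples (cur ++ [r]) (by simp)]
        simp [pvGoAux, hp]

-- pvGoAux is the open-group form of B's head-plus-span recursion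
theorem pvGoAux_eq_alt (rows : List (List (String × Int))) (cur : List (List (String × Int))) :
    pvGoAux cur rows =
      (cur ++ rows.takeWhile (fun r => ¬ (pvGetStep r = some 0))) ::
        group_steps_by_sample_py_alt (rows.dropWhile (fun r => ¬ (pvGetStep r = some 0))) := by
  induction rows generalizing cur with
  | nil => simp [pvGoAux, group_steps_by_sample_py_alt]
  | cons r rs ih =>
      by_cases hp : pvGetStep r = some 0
      · simp only [pvGoAux, hp, if_true, List.takeWhile_cons, List.dropWhile_cons,
          decide_not, decide_true, Bool.not_true, Bool.false_eq_true, if_false,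
          List.append_nil]
        rw [ih [r]]
        simp [group_steps_by_sample_py_alt]
      · simp only [pvGoAux, hp, if_false, List.takeWhile_cons, List.dropWhile_cons,
          decide_not, hp, decide_false, Bool.not_false, if_true]
        rw [ih (cur ++ [r])]
        simp

-- ===== VERDICT (by name: the statement is the Claim_ definition above) =====
theorem group_steps_by_sample_py_spec : Claim_equal_group_steps_by_sample_py := by
  intro step_rows _
  unfold Spec_group_steps_by_sample_py
  cases step_rows with
  | nil => simp [group_steps_by_sample_py, group_steps_by_sample_py_alt]
  | cons x rest =>
      show (let st := (x :: rest).foldl _ ([], []); if st.2 ≠ [] then st.1 ++ [st.2] else st.1) = _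
      simp only [List.foldl_cons]
      by_cases hp : pvGetStep x = some 0 <;>
      · simp only [hp, ne_eq, not_true_eq_false, and_false, and_self, if_false,
          List.nil_append]
        rw [pvFold_eq_goAux rest [] [x] (by simp), pvGoAux_eq_alt]
        simp [group_steps_by_sample_py_alt]
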